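-- pv_equiv track=rewrite | github.com/jesusoterove/sofiapos | backend/app/utils/base36.py | decode_base36
-- ===== SOURCE A (Python) =====
-- BASE36_CHARS = 'ABCDEFGHIJKLMNOPQRSTUVWXYZ0123456789'
--
-- def decode_base36(string: str) -> int:
--     """
--     Decode a base-36 string to number.
--
--     Args:
--         string: Base-36 encoded string (case-insensitive)
--
--     Returns:
--         Decoded integer
--
--     Raises:
--         ValueError: If string contains invalid characters
--     """
--     string = string.upper()
--     result = 0
--
--     for char in string:
--         if char not in BASE36_CHARS:
--             raise ValueError(f"Invalid base-36 character: {char}")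
--         result = result * 36 + BASE36_CHARS.index(char)
--
--     return result
-- ===== SOURCE B (Python) =====
-- BASE36_CHARS = 'ABCDEFGHIJKLMNOPQRSTUVWXYZ0123456789'
--
-- def decode_base36(string: str) -> int:
--     s = string.upper()
--     for char in s:
--         if char not in BASE36_CHARS:
--             raise ValueError(f"Invalid base-36 character: {char}")
--     total = 0
--     weight = 1
--     for char in reversed(s):
--         total += BASE36_CHARS.index(char) * weight
--         weight *= 36
--     return total
-- ===== Notes on version B (the rewrite author's own statement) =====
-- stated objective: alternative
-- what changed: Replaces A's single left-to-right Horner accumulation (result = result*36 + digit) with a left-to-right validation pass followed by a reversed-order summation pass that maintains an explicit positional weight (weight *= 36).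
import Mathlib
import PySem

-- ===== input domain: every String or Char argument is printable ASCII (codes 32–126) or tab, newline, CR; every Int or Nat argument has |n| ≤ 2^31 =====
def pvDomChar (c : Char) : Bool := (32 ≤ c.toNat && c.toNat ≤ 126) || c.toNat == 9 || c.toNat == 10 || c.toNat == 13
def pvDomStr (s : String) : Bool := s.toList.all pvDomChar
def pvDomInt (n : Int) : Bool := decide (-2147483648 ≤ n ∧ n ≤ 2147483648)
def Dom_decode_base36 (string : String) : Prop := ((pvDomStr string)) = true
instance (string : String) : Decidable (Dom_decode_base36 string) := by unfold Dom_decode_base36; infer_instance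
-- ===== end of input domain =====

-- B replaces A's Horner accumulator with a validation pass plus a reversed-order pass keeping an explicit positional weight (objective: alternative decomposition).

-- module constant BASE36_CHARS
def pvB36 : List Char := "ABCDEFGHIJKLMNOPQRSTUVWXYZ0123456789".toList

-- ===== PORT A =====
-- Horner loop: result = result*36 + BASE36_CHARS.index(char).  For a char present in
-- BASE36_CHARS, PySem.Chars.find pvB36 [c] is exactly str.index; the ValueError branch
-- (char absent) is excluded by Pre_decode_base36.
def decode_base36 (string : String) : Int :=
  ((PySem.Str.upper string).toList).foldl
    (fun result char => result * 36 + PySem.Chars.find pvB36 [char]) 0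

-- ===== PORT B =====
-- Source B's second loop: over reversed(s), total += BASE36_CHARS.index(char) * weight; weight *= 36.
-- (Source B's first, validation-only loop raises ValueError exactly where A does; excluded by Pre_.)
def pvAltGo : Int → Int → List Char → Int
  | total, _, [] => total
  | total, weight, char :: rest =>
      pvAltGo (total + PySem.Chars.find pvB36 [char] * weight) (weight * 36) rest

def decode_base36_alt (string : String) : Int :=
  pvAltGo 0 1 ((PySem.Str.upper string).toList.reverse)

-- ===== PRECONDITION & SPEC =====
-- Pre_ excludes exactly the inputs where A raises ValueError: some uppercased char not in BASE36_CHARS.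
def Pre_decode_base36 (string : String) : Prop :=
  ((PySem.Str.upper string).toList.all (fun c => c ∈ pvB36)) = true
instance (string : String) : Decidable (Pre_decode_base36 string) := by unfold Pre_decode_base36; infer_instance

def pvWitness_decode_base36 : String := "Sofia1"

def Spec_decode_base36 (string : String) (out : Int) : Prop := out = decode_base36_alt string
instance (string : String) (out : Int) : Decidable (Spec_decode_base36 string out) := by unfold Spec_decode_base36; infer_instance

-- ===== CLAIM (what is proved, stated in full; the proofs are below) =====
def Claim_equal_decode_base36 : Prop := ∀ (string : String), Dom_decode_base36 string → Pre_decode_base36 string → Spec_decode_base36 string (decode_base36 string)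

-- ===== LEMMAS AND PROOFS =====

-- little-endian place value of a digit string (proof-only characterisation)
def pvPolyR : List Char → Int
  | [] => 0
  | c :: cs => PySem.Chars.find pvB36 [c] + 36 * pvPolyR cs

theorem pvPolyR_append (xs : List Char) (c : Char) :
    pvPolyR (xs ++ [c]) = pvPolyR xs + PySem.Chars.find pvB36 [c] * (36 : Int) ^ xs.length := by
  induction xs with
  | nil => simp [pvPolyR]
  | cons x t ih => simp only [List.cons_append, pvPolyR, ih, List.length_cons, pow_succ]; ring

theorem pvHorner_eq (l : List Char) : ∀ r : Int,
    l.foldl (fun result char => result * 36 + PySem.Chars.find pvB36 [char]) r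
      = r * (36 : Int) ^ l.length + pvPolyR l.reverse := by
  induction l with
  | nil => intro r; simp [pvPolyR]
  | cons c cs ih =>
      intro r
      simp only [List.foldl_cons, ih, List.reverse_cons, pvPolyR_append,
        List.length_reverse, List.length_cons, pow_succ]
      ring

theorem pvAltGo_eq (l : List Char) : ∀ (t w : Int),
    pvAltGo t w l = t + w * pvPolyR l := by
  induction l with
  | nil => intro t w; simp [pvAltGo, pvPolyR]
  | cons c cs ih =>
      intro t w
      simp only [pvAltGo, ih, pvPolyR]
      ring

-- ===== VERDICT (by name: the statement is the Claim_ definition above) =====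
theorem decode_base36_spec : Claim_equal_decode_base36 := by
  intro string _ _
  unfold Spec_decode_base36 decode_base36 decode_base36_alt
  rw [pvHorner_eq, pvAltGo_eq]
  simp
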